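-- pv_equiv track=rewrite | github.com/fspv/learning | l33tcode/numbers-at-most-n-given-digit-set.py | atMostNGivenDigitSet
-- ===== SOURCE A (Python) =====
-- from typing import List
--
-- def atMostNGivenDigitSet(digits: List[str], n: int) -> int:
--     num = list(map(int, str(n)))
--
--     result = 0
--
--     for length in range(1, len(num)):
--         result += len(digits) ** length
--
--     def dfs(pos: int) -> int:
--         if pos == len(num):
--             return 1
--
--         combinations = 0
--
--         for digit in map(int, digits):
--             if digit < int(num[pos]):
--                 combinations += len(digits) ** (len(num) - (pos + 1))
--             elif digit == int(num[pos]):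
--                 combinations += dfs(pos + 1)
--
--         return combinations
--
--     return dfs(0) + result
-- ===== SOURCE B (Python) =====
-- from typing import List
--
-- def atMostNGivenDigitSet(digits: List[str], n: int) -> int:
--     num = str(n)
--     vals = [int(d) for d in digits]
--     k = len(digits)
--     L = len(num)
--     result = sum(k ** length for length in range(1, L))
--     mult = 1
--     for pos in range(L):
--         d = int(num[pos])
--         lt = sum(1 for v in vals if v < d)
--         result += lt * k ** (L - pos - 1) * mult
--         eq = sum(1 for v in vals if v == d)
--         if eq == 0:
--             mult = 0
--             break
--         mult *= eq
--     return result + mult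
-- ===== Notes on version B (the rewrite author's own statement) =====
-- stated objective: simpler
-- what changed: Replaces A's recursive dfs (which re-parses digits and recurses per matching digit) with a single left-to-right pass carrying a tight multiplier: at each position add (count of digits below num[pos]) * k^(remaining) * mult, multiply mult by the count of equal digits (break on 0), and add mult at the end.
import Mathlib
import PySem

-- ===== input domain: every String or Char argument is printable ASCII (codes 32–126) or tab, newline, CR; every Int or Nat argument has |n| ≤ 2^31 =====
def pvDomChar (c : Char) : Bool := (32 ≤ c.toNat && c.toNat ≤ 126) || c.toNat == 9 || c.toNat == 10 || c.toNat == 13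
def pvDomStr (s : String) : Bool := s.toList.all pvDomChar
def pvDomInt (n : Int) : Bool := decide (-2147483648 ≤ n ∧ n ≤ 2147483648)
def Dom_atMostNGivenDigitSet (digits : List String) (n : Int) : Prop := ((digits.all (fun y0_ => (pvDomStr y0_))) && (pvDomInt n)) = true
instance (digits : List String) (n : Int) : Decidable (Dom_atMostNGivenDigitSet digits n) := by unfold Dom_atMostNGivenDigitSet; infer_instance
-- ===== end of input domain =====

-- B replaces A's per-position recursive dfs with one forward pass carrying a tight multiplier (simpler, no recursion over equal digits).

-- ===== PORT A =====
-- dfs(pos): ported by structural recursion on the suffix num[pos:]; rest.length = len(num)-(pos+1)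
def dfsA (digits : List String) (dn : Nat) : List Int → Int
  | [] => 1
  | d :: rest =>
      (digits.map (fun s => (PySem.Int.ofStr? s).getD 0)).foldl
        (fun comb g =>
          if g < d then comb + (dn : Int) ^ rest.length
          else if g = d then comb + dfsA digits dn rest
          else comb) 0

def atMostNGivenDigitSet (digits : List String) (n : Int) : Int :=
  let num := (PySem.Int.toChars n).map (fun c => (PySem.Int.ofChars? [c]).getD 0)
  let result := (PySem.List.pyRange 1 num.length 1).foldl
      (fun r len => r + (digits.length : Int) ^ len.toNat) 0
  dfsA digits digits.length num + result

-- ===== PORT B =====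
def walkB (vals : List Int) (k : Nat) : List Int → Int → Int
  | [], mult => mult
  | d :: rest, mult =>
      let lt := (vals.filter (fun v => v < d)).length
      let eq := (vals.filter (fun v => v = d)).length
      (lt : Int) * (k : Int) ^ rest.length * mult +
        (if eq = 0 then 0 else walkB vals k rest (mult * eq))

def atMostNGivenDigitSet_alt (digits : List String) (n : Int) : Int :=
  let num := (PySem.Int.toChars n).map (fun c => (PySem.Int.ofChars? [c]).getD 0)
  let vals := digits.map (fun s => (PySem.Int.ofStr? s).getD 0)
  let k := digits.length
  let shorter := (PySem.List.pyRange 1 num.length 1).foldl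
      (fun r len => r + (k : Int) ^ len.toNat) 0
  shorter + walkB vals k num 1

-- ===== PRECONDITION & SPEC =====
-- Pre_ excludes exactly the inputs where Python A raises ValueError: n < 0 (int('-') on the sign
-- character of str(n)) or a digit string int() cannot parse.
def Pre_atMostNGivenDigitSet (digits : List String) (n : Int) : Prop :=
  0 ≤ n ∧ digits.all (fun s => (PySem.Int.ofStr? s).isSome) = true
instance (digits : List String) (n : Int) : Decidable (Pre_atMostNGivenDigitSet digits n) := by
  unfold Pre_atMostNGivenDigitSet; infer_instance

def pvWitness_atMostNGivenDigitSet : List String × Int := (["1", "3", "5"], 437)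

def Spec_atMostNGivenDigitSet (digits : List String) (n : Int) (out : Int) : Prop := out = atMostNGivenDigitSet_alt digits n
instance (digits : List String) (n : Int) (out : Int) : Decidable (Spec_atMostNGivenDigitSet digits n out) := by unfold Spec_atMostNGivenDigitSet; infer_instance

-- ===== CLAIM (what is proved, stated in full; the proofs are below) =====
def Claim_equal_atMostNGivenDigitSet : Prop := ∀ (digits : List String) (n : Int), Dom_atMostNGivenDigitSet digits n → Pre_atMostNGivenDigitSet digits n → Spec_atMostNGivenDigitSet digits n (atMostNGivenDigitSet digits n)

-- ===== LEMMAS AND PROOFS =====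

-- A's inner loop counts: c + (#digits < d) * p + (#digits = d) * s
lemma foldl_count_lt_eq (d p s : Int) (l : List Int) (c : Int) :
    l.foldl (fun comb g => if g < d then comb + p else if g = d then comb + s else comb) c
      = c + ((l.filter (fun v => v < d)).length : Int) * p
          + ((l.filter (fun v => v = d)).length : Int) * s := by
  induction l generalizing c with
  | nil => simp
  | cons g l ih =>
      simp only [List.foldl_cons, List.filter_cons]
      by_cases h1 : g < d
      · have h2 : ¬ g = d := by omega
        simp [h1, h2, ih]; push_cast; ring
      · by_cases h2 : g = d
        · simp [h1, h2, ih]; push_cast; ring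
        · simp [h1, h2, ih]

-- B's tight walk is mult times A's dfs
lemma walkB_eq_mul_dfsA (digits : List String) (rest : List Int) (mult : Int) :
    walkB (digits.map (fun s => (PySem.Int.ofStr? s).getD 0)) digits.length rest mult
      = mult * dfsA digits digits.length rest := by
  induction rest generalizing mult with
  | nil => simp [walkB, dfsA]
  | cons d rest ih =>
      rw [walkB, dfsA, foldl_count_lt_eq]
      rw [ih]
      by_cases h : (List.filter (fun v => v = d)
          (digits.map (fun s => (PySem.Int.ofStr? s).getD 0))).length = 0
      · simp [h]; ring
      · simp only [if_neg h]
        ring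

-- ===== VERDICT (by name: the statement is the Claim_ definition above) =====
theorem atMostNGivenDigitSet_spec : Claim_equal_atMostNGivenDigitSet := by
  intro digits n _ _
  unfold Spec_atMostNGivenDigitSet atMostNGivenDigitSet atMostNGivenDigitSet_alt
  simp only
  rw [walkB_eq_mul_dfsA]
  ring
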